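-- pv_equiv track=rewrite | github.com/lcrocker/ewc | oldewc/extensions.py | look_ahead
-- ===== SOURCE A (Python) =====
-- def look_ahead(source, head="", tail=""):
--     """
--     Combine the first and last lines of an iterator with the
--     head and tail strings passed in. This is used to supress
--     the creation of extra newlines in inline extensions such
--     as <<include>>.  Traditional parsers wouldn't have to
--     do this because they iterate over characters, not lines.
--     """
--     buf = head
--     first = True
--
--     for line in source:
--         if first:
--             first = False
--             buf += line
--             continue
--         yield buf
--         buf = line
--     yield buf + tail
-- ===== SOURCE B (Python) =====
-- def look_ahead(source, head="", tail=""):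
--     lines = list(source)
--     if not lines:
--         yield head + tail
--         return
--     lines[0] = head + lines[0]
--     lines[-1] = lines[-1] + tail
--     yield from lines
-- ===== Notes on version B (the rewrite author's own statement) =====
-- stated objective: simpler
-- what changed: Replaces the streaming one-line-behind buffer and `first` flag with a materialized list mutated at both ends (lines[0] and lines[-1]) and yielded wholesale.
import Mathlib
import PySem

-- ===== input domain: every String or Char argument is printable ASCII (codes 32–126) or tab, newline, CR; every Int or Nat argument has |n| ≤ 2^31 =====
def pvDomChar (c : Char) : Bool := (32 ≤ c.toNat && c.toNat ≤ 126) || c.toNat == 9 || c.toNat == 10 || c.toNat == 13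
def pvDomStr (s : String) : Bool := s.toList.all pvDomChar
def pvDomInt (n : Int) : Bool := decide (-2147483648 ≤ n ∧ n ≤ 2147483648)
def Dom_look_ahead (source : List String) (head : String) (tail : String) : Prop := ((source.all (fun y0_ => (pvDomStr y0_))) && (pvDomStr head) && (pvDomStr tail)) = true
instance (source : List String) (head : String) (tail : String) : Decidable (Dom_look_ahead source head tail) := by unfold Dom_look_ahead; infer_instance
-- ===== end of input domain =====

-- ===== PORT A =====
-- step of A's loop: state = (yielded output, buf, first flag)
def lookAheadStep (st : List String × String × Bool) (line : String) : List String × String × Bool :=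
  if st.2.2 then (st.1, st.2.1 ++ line, false)
  else (st.1 ++ [st.2.1], line, false)

def look_ahead (source : List String) (head : String) (tail : String) : List String :=
  let st := source.foldl lookAheadStep ([], head, true)
  st.1 ++ [st.2.1 ++ tail]

-- ===== PORT B =====
-- B: materialize, mutate both ends (B (simpler): indexed list mutated at both ends instead of a streaming buffer); equivalence is about the returned sequence of yields
def look_ahead_alt (source : List String) (head : String) (tail : String) : List String :=
  if source = [] then [head ++ tail]
  else
    let lines := source.set 0 (head ++ source.headI)
    lines.set (lines.length - 1) (lines.getLastD "" ++ tail)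

-- ===== PRECONDITION & SPEC =====
def Spec_look_ahead (source : List String) (head : String) (tail : String) (out : List String) : Prop := out = look_ahead_alt source head tail
instance (source : List String) (head : String) (tail : String) (out : List String) : Decidable (Spec_look_ahead source head tail out) := by unfold Spec_look_ahead; infer_instance

-- ===== CLAIM (what is proved, stated in full; the proofs are below) =====
def Claim_equal_look_ahead : Prop := ∀ (source : List String) (head : String) (tail : String), Dom_look_ahead source head tail → Spec_look_ahead source head tail (look_ahead source head tail)

-- ===== LEMMAS AND PROOFS =====

-- ===== VERDICT (by name: the statement is the Claim_ definition above) =====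
-- A's loop after the first line: out grows by dropLast, buf ends as the last element
lemma foldA (l : List String) (out : List String) (buf : String) :
    l.foldl lookAheadStep (out, buf, false)
      = (out ++ (buf :: l).dropLast, (buf :: l).getLastD "", false) := by
  induction l generalizing out buf with
  | nil => simp
  | cons a l ih =>
      simp only [List.foldl_cons, lookAheadStep, Bool.false_eq_true, if_false]
      rw [ih]
      cases l <;> simp

-- setting the last position of a nonempty list
lemma set_last (m : List String) (v : String) (h : m ≠ []) :
    m.set (m.length - 1) v = m.dropLast ++ [v] := by
  induction m with
  | nil => exact absurd rfl h
  | cons a m ih =>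
      cases m with
      | nil => simp
      | cons b m' =>
          simp only [List.length_cons, Nat.add_sub_cancel, List.set]
          have := ih (by simp)
          simp only [List.length_cons, Nat.add_sub_cancel] at this
          simp [this]

theorem look_ahead_spec : Claim_equal_look_ahead := by
  intro source head tail _
  unfold Spec_look_ahead look_ahead look_ahead_alt
  cases source with
  | nil => simp
  | cons x rest =>
      simp only [List.foldl_cons, lookAheadStep, if_true]
      rw [foldA]
      have hne : (head ++ x) :: rest ≠ ([] : List String) := by simp
      have h2 := set_last ((head ++ x) :: rest) (((head ++ x) :: rest).getLastD "" ++ tail) hne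
      simp only [List.length_cons, Nat.add_sub_cancel, List.getLastD_eq_getLast?] at h2
      simp [h2]
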